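-- pv_equiv track=rewrite | github.com/Inori/GPCS4 | Tools/NpCodeRPCS3ToGPCS4.py | FixStandardType
-- ===== SOURCE A (Python) =====
-- def FixStandardType(param_list):
--     new_param_list = []
--     for idx, param in enumerate(param_list):
--         new_param = param
--         new_param = new_param.replace('u8', 'uint8_t')
--         new_param = new_param.replace('u16', 'uint16_t')
--         new_param = new_param.replace('u32', 'uint32_t')
--         new_param = new_param.replace('u64', 'uint64_t')
--         new_param = new_param.replace('s8', 'int8_t')
--         new_param = new_param.replace('s16', 'int16_t')
--         new_param = new_param.replace('s32', 'int32_t')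
--         new_param = new_param.replace('s64', 'int64_t')
--         new_param_list.append(new_param)
--     return new_param_list
-- ===== SOURCE B (Python) =====
-- # Single left-to-right tokenizing pass driven by a shorthand->standard-type table,
-- # instead of eight sequential full-string replace passes.
-- TYPE_TABLE = [('u8', 'uint8_t'), ('u16', 'uint16_t'), ('u32', 'uint32_t'), ('u64', 'uint64_t'),
--               ('s8', 'int8_t'), ('s16', 'int16_t'), ('s32', 'int32_t'), ('s64', 'int64_t')]
--
--
-- def FixStandardType(param_list):
--     def scan(s):
--         parts = []
--         i = 0
--         n = len(s)
--         while i < n: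
--             for k, v in TYPE_TABLE:
--                 if s.startswith(k, i):
--                     parts.append(v)
--                     i += len(k)
--                     break
--             else:
--                 parts.append(s[i])
--                 i += 1
--         return ''.join(parts)
--     return [scan(p) for p in param_list]
-- ===== Notes on version B (the rewrite author's own statement) =====
-- stated objective: alternative
-- what changed: Replaces the eight sequential full-string replace passes with a single left-to-right tokenizing scan of each string driven by a shorthand-to-standard-type table (correct because no key is a prefix of another and no replacement text contains or straddles a key).
import Mathlib
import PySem

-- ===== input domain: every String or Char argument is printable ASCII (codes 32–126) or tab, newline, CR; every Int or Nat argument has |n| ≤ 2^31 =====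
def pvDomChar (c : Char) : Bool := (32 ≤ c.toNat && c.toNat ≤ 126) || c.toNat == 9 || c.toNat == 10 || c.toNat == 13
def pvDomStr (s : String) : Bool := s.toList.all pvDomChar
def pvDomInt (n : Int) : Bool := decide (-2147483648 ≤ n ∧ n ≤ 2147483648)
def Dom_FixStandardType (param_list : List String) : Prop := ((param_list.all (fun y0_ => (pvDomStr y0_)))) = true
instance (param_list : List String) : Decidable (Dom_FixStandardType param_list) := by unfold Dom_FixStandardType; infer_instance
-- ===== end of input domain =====

-- B replaces A's eight sequential full-string replace passes with one left-to-right
-- table-driven tokenizing scan per string (objective: alternative; same results, proved below).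

-- ===== PORT A =====
def FixStandardType (param_list : List String) : List String :=
  param_list.foldl (fun new_param_list param =>
    let p1 := PySem.Str.replace param "u8" "uint8_t"
    let p2 := PySem.Str.replace p1 "u16" "uint16_t"
    let p3 := PySem.Str.replace p2 "u32" "uint32_t"
    let p4 := PySem.Str.replace p3 "u64" "uint64_t"
    let p5 := PySem.Str.replace p4 "s8" "int8_t"
    let p6 := PySem.Str.replace p5 "s16" "int16_t"
    let p7 := PySem.Str.replace p6 "s32" "int32_t"
    let p8 := PySem.Str.replace p7 "s64" "int64_t"
    new_param_list ++ [p8]) []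

-- ===== PORT B =====
-- the shorthand -> standard-type table of Source B, on char lists
def pvTypeTable : List (List Char × List Char) :=
  [ (['u','8'], ['u','i','n','t','8','_','t'])
  , (['u','1','6'], ['u','i','n','t','1','6','_','t'])
  , (['u','3','2'], ['u','i','n','t','3','2','_','t'])
  , (['u','6','4'], ['u','i','n','t','6','4','_','t'])
  , (['s','8'], ['i','n','t','8','_','t'])
  , (['s','1','6'], ['i','n','t','1','6','_','t'])
  , (['s','3','2'], ['i','n','t','3','2','_','t'])
  , (['s','6','4'], ['i','n','t','6','4','_','t']) ]

-- Source B's inner while loop: at position i, the first table key that is a prefix of the rest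
-- (the `for … startswith … break/else`) is emitted as its value and skipped, otherwise one
-- char is copied.  `t.drop (kv.1.length - 1)` is exactly "advance i by len(k)" since every
-- key of the table is nonempty.
def pvScan (T : List (List Char × List Char)) (s : List Char) : List Char :=
  match s with
  | [] => []
  | c :: t =>
    match T.find? (fun kv => kv.1.isPrefixOf (c :: t)) with
    | some kv => kv.2 ++ pvScan T (t.drop (kv.1.length - 1))
    | none => c :: pvScan T t
  termination_by s.length
  decreasing_by
  · simp only [List.length_cons]
    have := List.length_drop (i := kv.1.length - 1) (l := t)
    omega
  · simp

def FixStandardType_alt (param_list : List String) : List String :=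
  param_list.map (fun param => String.ofList (pvScan pvTypeTable param.toList))

-- ===== PRECONDITION & SPEC =====
def Spec_FixStandardType (param_list : List String) (out : List String) : Prop := out = FixStandardType_alt param_list
instance (param_list : List String) (out : List String) : Decidable (Spec_FixStandardType param_list out) := by unfold Spec_FixStandardType; infer_instance

-- ===== CLAIM (what is proved, stated in full; the proofs are below) =====
def Claim_equal_FixStandardType : Prop := ∀ (param_list : List String), Dom_FixStandardType param_list → Spec_FixStandardType param_list (FixStandardType param_list)

-- ===== LEMMAS AND PROOFS =====

-- fuel-free characterisation of one Python replace pass (leftmost, non-overlapping)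
def pvRep (old new : List Char) (s : List Char) : List Char :=
  match s with
  | [] => []
  | c :: t =>
    if old.isPrefixOf (c :: t) then new ++ pvRep old new (t.drop (old.length - 1))
    else c :: pvRep old new t
  termination_by s.length
  decreasing_by
  · simp only [List.length_cons]
    have := List.length_drop (i := old.length - 1) (l := t)
    omega
  · simp

theorem pvRep_go (old new : List Char) (hold : old ≠ []) :
    ∀ (fuel : Nat) (l acc : List Char), l.length ≤ fuel →
      PySem.Chars.replace.go old new fuel l acc = acc.reverse ++ pvRep old new l := by
  intro fuel
  induction fuel with
  | zero =>
    intro l acc h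
    have hl : l = [] := List.eq_nil_of_length_eq_zero (Nat.le_zero.mp h)
    subst hl
    simp [PySem.Chars.replace.go, pvRep]
  | succ n ih =>
    intro l acc h
    match l with
    | [] => simp [PySem.Chars.replace.go, pvRep]
    | c :: t =>
      simp only [PySem.Chars.replace.go]
      by_cases hp : old.isPrefixOf (c :: t) = true
      · simp only [hp, if_true]
        obtain ⟨oh, ot, rfl⟩ : ∃ oh ot, old = oh :: ot := by
          cases old with
          | nil => exact absurd rfl hold
          | cons oh ot => exact ⟨oh, ot, rfl⟩
        have hdrop : (c :: t).drop (oh :: ot).length = t.drop ((oh :: ot).length - 1) := by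
          simp
        rw [hdrop, ih _ (new.reverse ++ acc) (by
          simp only [List.length_drop, List.length_cons] at h ⊢
          omega)]
        simp [pvRep, hp]
      · simp only [hp, if_false]
        rw [ih t (c :: acc) (by simpa using Nat.lt_succ_iff.mp (by simpa using h))]
        simp [pvRep, hp]

theorem pvReplace_eq (s old new : List Char) (h : old ≠ []) :
    PySem.Chars.replace s old new = pvRep old new s := by
  unfold PySem.Chars.replace
  have : old.isEmpty = false := by simpa [List.isEmpty_iff] using h
  rw [this]
  simpa using pvRep_go old new h s.length s [] (le_refl _)

theorem pvRep_nil (old new : List Char) : pvRep old new [] = [] := by simp [pvRep]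

theorem pvRep_cons_neg (old new : List Char) (c : Char) (t : List Char)
    (h : old.isPrefixOf (c :: t) = false) :
    pvRep old new (c :: t) = c :: pvRep old new t := by
  rw [pvRep, h]; simp

theorem pvRep_append_self (oh : Char) (ot new X : List Char) :
    pvRep (oh :: ot) new ((oh :: ot) ++ X) = new ++ pvRep (oh :: ot) new X := by
  have hp : (oh :: ot).isPrefixOf (oh :: (ot ++ X)) = true :=
    List.isPrefixOf_iff_prefix.mpr ⟨X, by simp⟩
  simp only [List.cons_append]
  rw [pvRep, hp]
  simp

-- a mismatch between a and k strictly inside a (so k cannot match at a's start)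
def pvMisAt (a k : List Char) : Bool := (a.zip k).any (fun p => p.1 != p.2)

-- k matches at no position strictly inside a
def pvNoStr (a k : List Char) : Bool :=
  match a with
  | [] => true
  | _ :: a' => pvMisAt a k && pvNoStr a' k

theorem not_prefix_of_misAt :
    ∀ (a k : List Char), pvMisAt a k = true → ∀ X, k.isPrefixOf (a ++ X) = false := by
  intro a
  induction a with
  | nil => intro k h X; simp [pvMisAt] at h
  | cons c a' ih =>
    intro k h X
    cases k with
    | nil => simp [pvMisAt] at h
    | cons d k' =>
      simp only [pvMisAt, List.zip_cons_cons, List.any_cons, Bool.or_eq_true] at h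
      by_cases hc : d = c
      · subst hc
        have h' : pvMisAt a' k' = true := by
          rcases h with h | h
          · simp at h
          · exact h
        simp [List.isPrefixOf, ih k' h' X]
      · have hb : (d == c) = false := by simp [hc]
        simp [List.isPrefixOf, hb]

theorem pvRep_append_of_noStr (k v : List Char) :
    ∀ (a : List Char), pvNoStr a k = true → ∀ X, pvRep k v (a ++ X) = a ++ pvRep k v X := by
  intro a
  induction a with
  | nil => intro _ X; simp
  | cons c a' ih =>
    intro h X
    simp only [pvNoStr, Bool.and_eq_true] at h
    simp only [List.cons_append]
    rw [pvRep_cons_neg _ _ _ _ (by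
          have := not_prefix_of_misAt (c :: a') k h.1 X
          simpa using this),
        ih h.2 X]

theorem pvScan_nil (T : List (List Char × List Char)) : pvScan T [] = [] := by simp [pvScan]

theorem pvScan_cons_some (T : List (List Char × List Char)) (c : Char) (t : List Char)
    (kv : List Char × List Char)
    (hf : T.find? (fun kv => kv.1.isPrefixOf (c :: t)) = some kv) :
    pvScan T (c :: t) = kv.2 ++ pvScan T (t.drop (kv.1.length - 1)) := by
  rw [pvScan, hf]

theorem pvScan_cons_none (T : List (List Char × List Char)) (c : Char) (t : List Char)
    (hf : T.find? (fun kv => kv.1.isPrefixOf (c :: t)) = none) :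
    pvScan T (c :: t) = c :: pvScan T t := by
  rw [pvScan, hf]

theorem pvScan_empty_table : ∀ l : List Char, pvScan [] l = l := by
  intro l
  induction l with
  | nil => simp [pvScan]
  | cons c t ih => rw [pvScan_cons_none [] c t (by simp), ih]

theorem find?_none_head (T : List (List Char × List Char)) (c : Char) (r : List Char)
    (h : ∀ kv ∈ T, kv.1 ≠ [] ∧ kv.1.head? ≠ some c) :
    T.find? (fun kv => kv.1.isPrefixOf (c :: r)) = none := by
  rw [List.find?_eq_none]
  intro kv hkv
  obtain ⟨h1, h2⟩ := h kv hkv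
  cases hk1 : kv.1 with
  | nil => exact absurd hk1 h1
  | cons kh kt =>
    have hne : kh ≠ c := by
      intro hEq; exact h2 (by simp [hk1, hEq])
    simp [hk1, List.isPrefixOf, hne]

theorem pvScan_append_inert (T : List (List Char × List Char)) :
    ∀ (d : List Char), (∀ ch ∈ d, ∀ kv ∈ T, kv.1 ≠ [] ∧ kv.1.head? ≠ some ch) →
      ∀ t, pvScan T (d ++ t) = d ++ pvScan T t := by
  intro d
  induction d with
  | nil => intro _ t; simp
  | cons d0 d' ih =>
    intro hd t
    rw [show (d0 :: d') ++ t = d0 :: (d' ++ t) by simp,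
        pvScan_cons_none T d0 (d' ++ t) (find?_none_head T d0 (d' ++ t)
          (hd d0 (by simp))),
        ih (fun ch hch => hd ch (by simp [hch])) t]
    simp

theorem not_prefix_pvScan (T : List (List Char × List Char))
    (hT : ∀ kv ∈ T, kv.2 ≠ []) :
    ∀ (d : List Char), (∀ ch ∈ d, ∀ kv ∈ T, kv.2.head? ≠ some ch) →
      ∀ t, d.isPrefixOf t = false → d.isPrefixOf (pvScan T t) = false := by
  intro d
  induction d with
  | nil => intro _ t h; simp at h
  | cons d0 d' ih =>
    intro hd t h
    cases t with
    | nil => simp [pvScan_nil, List.isPrefixOf]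
    | cons c t' =>
      cases hf : T.find? (fun kv => kv.1.isPrefixOf (c :: t')) with
      | some kv =>
        have hmem := List.mem_of_find?_eq_some hf
        rw [pvScan_cons_some T c t' kv hf]
        cases hv : kv.2 with
        | nil => exact absurd hv (hT kv hmem)
        | cons vh vt =>
          have hne : d0 ≠ vh := by
            intro hEq
            exact (hd d0 (by simp) kv hmem) (by simp [hv, hEq])
          simp [hv, List.isPrefixOf, hne]
      | none =>
        rw [pvScan_cons_none T c t' hf]
        simp only [List.isPrefixOf] at h ⊢
        by_cases hc : d0 = c
        · subst hc
          simp only [beq_self_eq_true, Bool.true_and] at h ⊢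
          exact ih (fun ch hch => hd ch (by simp [hch])) t' h
        · simp [hc]

-- one pass of A's replace folded into the scanner's table
theorem pvStep (T : List (List Char × List Char)) (kh : Char) (kt v : List Char)
    (h1 : ∀ kv ∈ T, kv.1 ≠ []) (h2 : ∀ kv ∈ T, kv.2 ≠ [])
    (h3 : ∀ kv ∈ T, pvNoStr kv.2 (kh :: kt) = true)
    (h4 : ∀ ch ∈ kt, ∀ kv ∈ T, kv.1.head? ≠ some ch ∧ kv.2.head? ≠ some ch) :
    ∀ l, pvRep (kh :: kt) v (pvScan T l) = pvScan (T ++ [(kh :: kt, v)]) l := by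
  suffices H : ∀ n (l : List Char), l.length ≤ n →
      pvRep (kh :: kt) v (pvScan T l) = pvScan (T ++ [(kh :: kt, v)]) l by
    intro l; exact H l.length l le_rfl
  intro n
  induction n with
  | zero =>
    intro l h
    have : l = [] := List.eq_nil_of_length_eq_zero (Nat.le_zero.mp h)
    subst this
    simp [pvScan_nil, pvRep_nil]
  | succ n ih =>
    intro l h
    cases l with
    | nil => simp [pvScan_nil, pvRep_nil]
    | cons c t =>
      cases hf : T.find? (fun kv => kv.1.isPrefixOf (c :: t)) with
      | some kv =>
        have hmem := List.mem_of_find?_eq_some hf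
        have hf' : (T ++ [(kh :: kt, v)]).find? (fun kv => kv.1.isPrefixOf (c :: t)) = some kv := by
          rw [List.find?_append, hf]; rfl
        rw [pvScan_cons_some T c t kv hf,
            pvRep_append_of_noStr (kh :: kt) v kv.2 (h3 kv hmem),
            pvScan_cons_some _ c t kv hf']
        congr 1
        apply ih
        simp only [List.length_drop, List.length_cons] at h ⊢
        omega
      | none =>
        by_cases hp : (kh :: kt).isPrefixOf (c :: t) = true
        · obtain ⟨t2, ht2⟩ := List.isPrefixOf_iff_prefix.mp hp
          have hc : kh = c := by
            have := congrArg List.head? ht2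
            simpa using this
          subst hc
          have ht : t = kt ++ t2 := by
            have h' := congrArg List.tail ht2
            simp at h'
            exact h'.symm
          subst ht
          rw [pvScan_cons_none T kh (kt ++ t2) hf,
              pvScan_append_inert T kt (fun ch hch kv hkv =>
                ⟨h1 kv hkv, (h4 ch hch kv hkv).1⟩) t2]
          have hl : kh :: (kt ++ pvScan T t2) = (kh :: kt) ++ pvScan T t2 := by simp
          rw [hl, pvRep_append_self kh kt v (pvScan T t2),
              ih t2 (by simp at h; omega)]
          have hf' : (T ++ [(kh :: kt, v)]).find? (fun kv => kv.1.isPrefixOf (kh :: (kt ++ t2))) = some (kh :: kt, v) := by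
            rw [List.find?_append]
            have : T.find? (fun kv => kv.1.isPrefixOf (kh :: (kt ++ t2))) = none := hf
            rw [this]
            simp [List.find?, hp]
          rw [pvScan_cons_some _ kh (kt ++ t2) (kh :: kt, v) hf']
          simp [List.drop_left]
        · have hpf : (kh :: kt).isPrefixOf (c :: t) = false :=
            eq_false_of_ne_true hp
          have hf' : (T ++ [(kh :: kt, v)]).find? (fun kv => kv.1.isPrefixOf (c :: t)) = none := by
            rw [List.find?_append, hf]
            simp [List.find?, hpf]
          rw [pvScan_cons_none T c t hf, pvScan_cons_none _ c t hf']
          have hnp : (kh :: kt).isPrefixOf (c :: pvScan T t) = false := by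
            by_cases hc : kh = c
            · subst hc
              simp only [List.isPrefixOf, beq_self_eq_true, Bool.true_and] at hpf ⊢
              exact not_prefix_pvScan T h2 kt
                (fun ch hch kv hkv => (h4 ch hch kv hkv).2) t hpf
            · simp [List.isPrefixOf, hc]
          rw [pvRep_cons_neg _ _ _ _ hnp, ih t (by simp at h; omega)]

-- A's full replace chain on one string equals B's single scan
set_option maxRecDepth 8192 in
theorem pvChain (l : List Char) :
    pvRep ['s','6','4'] ['i','n','t','6','4','_','t']
      (pvRep ['s','3','2'] ['i','n','t','3','2','_','t']
        (pvRep ['s','1','6'] ['i','n','t','1','6','_','t']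
          (pvRep ['s','8'] ['i','n','t','8','_','t']
            (pvRep ['u','6','4'] ['u','i','n','t','6','4','_','t']
              (pvRep ['u','3','2'] ['u','i','n','t','3','2','_','t']
                (pvRep ['u','1','6'] ['u','i','n','t','1','6','_','t']
                  (pvRep ['u','8'] ['u','i','n','t','8','_','t'] l))))))) =
    pvScan pvTypeTable l := by
  have e1 := pvStep [] 'u' ['8'] ['u','i','n','t','8','_','t']
    (by decide) (by decide) (by decide) (by intro ch hch kv hkv; fin_cases hch <;> fin_cases hkv <;> exact ⟨by decide, by decide⟩)
  have e2 := pvStep [(['u','8'], ['u','i','n','t','8','_','t'])]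
    'u' ['1','6'] ['u','i','n','t','1','6','_','t']
    (by decide) (by decide) (by decide) (by intro ch hch kv hkv; fin_cases hch <;> fin_cases hkv <;> exact ⟨by decide, by decide⟩)
  have e3 := pvStep [(['u','8'], ['u','i','n','t','8','_','t']),
    (['u','1','6'], ['u','i','n','t','1','6','_','t'])]
    'u' ['3','2'] ['u','i','n','t','3','2','_','t']
    (by decide) (by decide) (by decide) (by intro ch hch kv hkv; fin_cases hch <;> fin_cases hkv <;> exact ⟨by decide, by decide⟩)
  have e4 := pvStep [(['u','8'], ['u','i','n','t','8','_','t']),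
    (['u','1','6'], ['u','i','n','t','1','6','_','t']),
    (['u','3','2'], ['u','i','n','t','3','2','_','t'])]
    'u' ['6','4'] ['u','i','n','t','6','4','_','t']
    (by decide) (by decide) (by decide) (by intro ch hch kv hkv; fin_cases hch <;> fin_cases hkv <;> exact ⟨by decide, by decide⟩)
  have e5 := pvStep [(['u','8'], ['u','i','n','t','8','_','t']),
    (['u','1','6'], ['u','i','n','t','1','6','_','t']),
    (['u','3','2'], ['u','i','n','t','3','2','_','t']),
    (['u','6','4'], ['u','i','n','t','6','4','_','t'])]
    's' ['8'] ['i','n','t','8','_','t']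
    (by decide) (by decide) (by decide) (by intro ch hch kv hkv; fin_cases hch <;> fin_cases hkv <;> exact ⟨by decide, by decide⟩)
  have e6 := pvStep [(['u','8'], ['u','i','n','t','8','_','t']),
    (['u','1','6'], ['u','i','n','t','1','6','_','t']),
    (['u','3','2'], ['u','i','n','t','3','2','_','t']),
    (['u','6','4'], ['u','i','n','t','6','4','_','t']),
    (['s','8'], ['i','n','t','8','_','t'])]
    's' ['1','6'] ['i','n','t','1','6','_','t']
    (by decide) (by decide) (by decide) (by intro ch hch kv hkv; fin_cases hch <;> fin_cases hkv <;> exact ⟨by decide, by decide⟩)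
  have e7 := pvStep [(['u','8'], ['u','i','n','t','8','_','t']),
    (['u','1','6'], ['u','i','n','t','1','6','_','t']),
    (['u','3','2'], ['u','i','n','t','3','2','_','t']),
    (['u','6','4'], ['u','i','n','t','6','4','_','t']),
    (['s','8'], ['i','n','t','8','_','t']),
    (['s','1','6'], ['i','n','t','1','6','_','t'])]
    's' ['3','2'] ['i','n','t','3','2','_','t']
    (by decide) (by decide) (by decide) (by intro ch hch kv hkv; fin_cases hch <;> fin_cases hkv <;> exact ⟨by decide, by decide⟩)
  have e8 := pvStep [(['u','8'], ['u','i','n','t','8','_','t']),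
    (['u','1','6'], ['u','i','n','t','1','6','_','t']),
    (['u','3','2'], ['u','i','n','t','3','2','_','t']),
    (['u','6','4'], ['u','i','n','t','6','4','_','t']),
    (['s','8'], ['i','n','t','8','_','t']),
    (['s','1','6'], ['i','n','t','1','6','_','t']),
    (['s','3','2'], ['i','n','t','3','2','_','t'])]
    's' ['6','4'] ['i','n','t','6','4','_','t']
    (by decide) (by decide) (by decide) (by intro ch hch kv hkv; fin_cases hch <;> fin_cases hkv <;> exact ⟨by decide, by decide⟩)
  simp only [List.cons_append, List.nil_append] at e1 e2 e3 e4 e5 e6 e7 e8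
  have h0 : pvRep ['u','8'] ['u','i','n','t','8','_','t'] l
      = pvScan [(['u','8'], ['u','i','n','t','8','_','t'])] l := by
    have h' := e1 l
    rwa [pvScan_empty_table l] at h'
  rw [h0, e2 l, e3 l, e4 l, e5 l, e6 l, e7 l, e8 l]
  rfl

theorem FixStandardType_spec : Claim_equal_FixStandardType := by
  intro param_list _
  unfold Spec_FixStandardType FixStandardType FixStandardType_alt
  rw [PySem.List.foldl_append_singleton_eq_map]
  simp only [List.nil_append]
  apply List.map_congr_left
  intro param _
  apply String.toList_inj.mp
  simp only [String.toList_ofList, PySem.Str.toList_replace]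
  rw [pvReplace_eq _ _ _ (by decide), pvReplace_eq _ _ _ (by decide),
      pvReplace_eq _ _ _ (by decide), pvReplace_eq _ _ _ (by decide),
      pvReplace_eq _ _ _ (by decide), pvReplace_eq _ _ _ (by decide),
      pvReplace_eq _ _ _ (by decide), pvReplace_eq _ _ _ (by decide)]
  exact pvChain param.toList
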